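-- pv_equiv track=rewrite | github.com/theodore-evans/padl | lf/dumptools/thingfinder.py | _fix_indent
-- ===== SOURCE A (Python) =====
-- def _fix_indent(source):
--     lines = source.split('\n')
--     res = []
--     n_indent = None
--     for line in lines:
--         if not line.startswith(' '):
--             res.append(line)
--         else:
--             if n_indent is None:
--                 n_indent = len(line) - len(line.lstrip(' '))
--             res.append(' ' * 4 + line[n_indent:])
--     return '\n'.join(res)
-- ===== SOURCE B (Python) =====
-- def _fix_indent(source):
--     # Character-level single scan: no split/join into lines. At each beginning of
--     # line, a leading space triggers the rewrite: emit four spaces and skip up to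
--     # n characters (never past the newline), where n is the length of the space
--     # run at the first indented line seen.
--     out = []
--     n = None
--     i = 0
--     L = len(source)
--     bol = True
--     while i < L:
--         c = source[i]
--         if bol and c == ' ':
--             if n is None:
--                 n = 0
--                 while i + n < L and source[i + n] == ' ':
--                     n += 1
--             out.append('    ')
--             k = 0
--             while k < n and i < L and source[i] != '\n':
--                 i += 1
--                 k += 1
--             bol = False
--         else:
--             out.append(c)
--             bol = c == '\n'
--             i += 1
--     return ''.join(out)
-- ===== Notes on version B (the rewrite author's own statement) =====
-- stated objective: alternative
-- what changed: Replaces A's split-into-lines loop (split on the newline separator, per-line rewrite, join back) by a character-level state machine: one scan over the raw string with a beginning-of-line flag that counts the first indent run in place and skips characters positionally, never materializing a list of lines.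
import Mathlib
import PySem

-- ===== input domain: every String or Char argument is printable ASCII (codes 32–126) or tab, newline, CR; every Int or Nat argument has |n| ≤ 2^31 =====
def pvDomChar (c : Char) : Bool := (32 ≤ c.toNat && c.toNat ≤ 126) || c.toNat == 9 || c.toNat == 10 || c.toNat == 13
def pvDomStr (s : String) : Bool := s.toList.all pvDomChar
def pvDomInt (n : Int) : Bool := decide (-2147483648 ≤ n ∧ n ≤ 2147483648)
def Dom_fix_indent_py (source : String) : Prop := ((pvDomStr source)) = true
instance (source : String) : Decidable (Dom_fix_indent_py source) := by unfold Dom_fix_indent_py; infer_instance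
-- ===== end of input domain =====

-- B replaces A's split-into-lines loop by a character-level state machine over the raw
-- string (beginning-of-line flag, in-place indent-run count, positional skip); same cost
-- (objective: alternative).

-- ===== PORT A =====
-- One stateful pass over the split lines: n_indent is None until the first space-indented line fixes it.
-- len(l) - len(l.lstrip(' ')) is ported by hand as l.length - (l.dropWhile (· = ' ')).length (exact:
-- lstrip(' ') drops leading spaces only); l[n:] for nonnegative n is l.drop n (exact).
def fixIndentLoop : Option Nat → List (List Char) → List (List Char)
  | _, [] => []
  | n?, l :: ls =>
    if PySem.Chars.startswith l [' '] = false then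
      l :: fixIndentLoop n? ls
    else
      match n? with
      | none =>
        let n := l.length - (l.dropWhile (· = ' ')).length
        (PySem.List.pyRepeat [' '] 4 ++ l.drop n) :: fixIndentLoop (some n) ls
      | some n =>
        (PySem.List.pyRepeat [' '] 4 ++ l.drop n) :: fixIndentLoop (some n) ls

def fix_indent_py (source : String) : String :=
  let lines := PySem.Chars.splitOn source.toList ['\n']
  String.ofList (PySem.Chars.join ['\n'] (fixIndentLoop none lines))

-- ===== PORT B =====
-- the inner `while i + n < L and source[i + n] == ' ': n += 1` counting loop, as a recursion
def countSpaces : List Char → Nat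
  | [] => 0
  | c :: cs => if c = ' ' then countSpaces cs + 1 else 0

-- the inner `while k < n and i < L and source[i] != '\n': i += 1; k += 1` skipping loop
def skipUpTo : Nat → List Char → List Char
  | 0, cs => cs
  | _ + 1, [] => []
  | k + 1, c :: cs => if c = '\n' then c :: cs else skipUpTo k cs

theorem skipUpTo_length_le (k : Nat) (cs : List Char) : (skipUpTo k cs).length ≤ cs.length := by
  induction cs generalizing k with
  | nil => cases k <;> simp [skipUpTo]
  | cons c cs ih =>
    cases k with
    | zero => simp [skipUpTo]
    | succ k =>
      simp only [skipUpTo]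
      split
      · exact le_refl _
      · exact Nat.le_succ_of_le (ih k)

-- the main `while i < L` loop: state = (n, bol), position i = the remaining characters
def scanB (n? : Option Nat) (bol : Bool) (cs : List Char) : List Char :=
  match cs with
  | [] => []
  | c :: rest =>
    if hcond : bol ∧ c = ' ' then
      let n := match n? with
        | none => countSpaces (c :: rest)
        | some n => n
      (' ' :: ' ' :: ' ' :: ' ' :: []) ++ scanB (some n) false (skipUpTo n (c :: rest))
    else
      c :: scanB n? (c = '\n') rest
termination_by cs.length * 2 + (if bol then 1 else 0)
decreasing_by
  · obtain ⟨hb, -⟩ := hcond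
    cases n? with
    | none =>
      have h := skipUpTo_length_le (countSpaces (c :: rest)) (c :: rest)
      simp [hb] at *
      omega
    | some m =>
      have h := skipUpTo_length_le m (c :: rest)
      simp [hb] at *
      omega
  · simp only [List.length_cons]
    split <;> split <;> omega

def fix_indent_py_alt (source : String) : String :=
  String.ofList (scanB none true source.toList)

-- ===== PRECONDITION & SPEC =====
def Spec_fix_indent_py (source : String) (out : String) : Prop := out = fix_indent_py_alt source
instance (source : String) (out : String) : Decidable (Spec_fix_indent_py source out) := by unfold Spec_fix_indent_py; infer_instance

-- ===== CLAIM (what is proved, stated in full; the proofs are below) =====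
def Claim_equal_fix_indent_py : Prop := ∀ (source : String), Dom_fix_indent_py source → Spec_fix_indent_py source (fix_indent_py source)

-- ===== LEMMAS AND PROOFS =====

-- simple recursion computing the same split as PySem.Chars.splitOn · ['\n'] (proof helper)
def sp : List Char → List (List Char)
  | [] => [[]]
  | c :: cs =>
    if c = '\n' then [] :: sp cs
    else
      match sp cs with
      | p :: ps => (c :: p) :: ps
      | [] => [[c]]

theorem sp_ne_nil (cs : List Char) : sp cs ≠ [] := by
  cases cs with
  | nil => simp [sp]
  | cons c cs =>
    simp only [sp]
    split
    · simp
    · split <;> simp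

theorem go_eq_sp (fuel : Nat) : ∀ (l cur : List Char) (acc : List (List Char)),
    l.length ≤ fuel →
    PySem.Chars.splitOn.go ['\n'] fuel l cur acc
      = acc.reverse ++ (cur.reverse ++ (sp l).headI) :: (sp l).tail := by
  induction fuel with
  | zero =>
    intro l cur acc hlen
    have hl : l = [] := List.length_eq_zero_iff.mp (Nat.le_zero.mp hlen)
    subst hl
    simp [PySem.Chars.splitOn.go, sp]
  | succ fuel ih =>
    intro l cur acc hlen
    cases l with
    | nil => simp [PySem.Chars.splitOn.go, sp]
    | cons c rest =>
      have hrest : rest.length ≤ fuel := by simpa using hlen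
      by_cases hc : c = '\n'
      · subst hc
        have hstep : PySem.Chars.splitOn.go ['\n'] (fuel + 1) ('\n' :: rest) cur acc
            = PySem.Chars.splitOn.go ['\n'] fuel rest [] (cur.reverse :: acc) := by
          simp [PySem.Chars.splitOn.go, List.isPrefixOf]
        rw [hstep, ih rest [] (cur.reverse :: acc) hrest]
        have hne := sp_ne_nil rest
        cases h : sp rest with
        | nil => exact absurd h hne
        | cons q qs => simp [sp, h]
      · have hc' : ¬ ('\n' = c) := fun h => hc h.symm
        have hstep : PySem.Chars.splitOn.go ['\n'] (fuel + 1) (c :: rest) cur acc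
            = PySem.Chars.splitOn.go ['\n'] fuel rest (c :: cur) acc := by
          simp [PySem.Chars.splitOn.go, List.isPrefixOf, hc']
        rw [hstep, ih rest (c :: cur) acc hrest]
        cases h : sp rest with
        | nil => exact absurd h (sp_ne_nil rest)
        | cons q qs => simp [sp, hc, h]

theorem splitOn_eq_sp (cs : List Char) : PySem.Chars.splitOn cs ['\n'] = sp cs := by
  unfold PySem.Chars.splitOn
  rw [go_eq_sp (cs.length + 1) cs [] [] (Nat.le_succ _)]
  cases h : sp cs with
  | nil => exact absurd h (sp_ne_nil cs)
  | cons q qs => simp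

theorem join_cons (c : Char) (p : List Char) (ps : List (List Char)) :
    PySem.Chars.join ['\n'] ((c :: p) :: ps) = c :: PySem.Chars.join ['\n'] (p :: ps) := by
  cases ps <;> simp [PySem.Chars.join, List.intercalate]

theorem join_sp (cs : List Char) : PySem.Chars.join ['\n'] (sp cs) = cs := by
  induction cs with
  | nil => simp [sp, PySem.Chars.join, List.intercalate]
  | cons c cs ih =>
    by_cases hc : c = '\n'
    · subst hc
      cases h : sp cs with
      | nil => exact absurd h (sp_ne_nil cs)
      | cons p ps =>
        simp only [sp, if_true, h]
        rw [h] at ih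
        simp [PySem.Chars.join, List.intercalate] at ih ⊢
        simpa using ih
    · cases h : sp cs with
      | nil => exact absurd h (sp_ne_nil cs)
      | cons p ps =>
        simp only [sp, if_neg hc, h]
        rw [join_cons, ← h, ih]

theorem no_nl_sp (cs : List Char) : ∀ p ∈ sp cs, '\n' ∉ p := by
  induction cs with
  | nil =>
    intro p hp
    simp [sp] at hp
    simp [hp]
  | cons c cs ih =>
    intro p hp
    by_cases hc : c = '\n'
    · subst hc
      have hp' : p = [] ∨ p ∈ sp cs := by simpa [sp] using hp
      rcases hp' with rfl | hp'
      · simp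
      · exact ih p hp'
    · cases h : sp cs with
      | nil => exact absurd h (sp_ne_nil cs)
      | cons q qs =>
        simp only [sp, if_neg hc, h, List.mem_cons] at hp
        rcases hp with rfl | hp
        · intro hmem
          rcases List.mem_cons.mp hmem with h' | h'
          · exact hc h'.symm
          · exact ih q (by simp [h]) h'
        · exact ih p (by simp [h, hp])

-- countSpaces computes what A's `len(l) - len(l.lstrip(' '))` computes
theorem countSpaces_eq (l : List Char) :
    countSpaces l = l.length - (l.dropWhile (· = ' ')).length := by
  induction l with
  | nil => simp [countSpaces]
  | cons c cs ih =>
    by_cases hc : c = ' '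
    · subst hc
      have hle := List.length_dropWhile_le (fun c => decide (c = ' ')) cs
      simp [countSpaces, List.dropWhile, ih]
      omega
    · simp [countSpaces, List.dropWhile, hc]

theorem skip_noNl (n : Nat) (l : List Char) (hl : '\n' ∉ l) : skipUpTo n l = l.drop n := by
  induction l generalizing n with
  | nil => cases n <;> simp [skipUpTo]
  | cons c cs ih =>
    cases n with
    | zero => simp [skipUpTo]
    | succ n =>
      have hc : c ≠ '\n' := fun h => hl (h ▸ List.mem_cons_self)
      simp [skipUpTo, hc, ih n (fun h => hl (List.mem_cons_of_mem _ h))]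

theorem skip_noNl_append (n : Nat) (l rest : List Char) (hl : '\n' ∉ l) :
    skipUpTo n (l ++ '\n' :: rest) = l.drop n ++ '\n' :: rest := by
  induction l generalizing n with
  | nil =>
    cases n with
    | zero => simp [skipUpTo]
    | succ n => simp [skipUpTo]
  | cons c cs ih =>
    cases n with
    | zero => simp [skipUpTo]
    | succ n =>
      have hc : c ≠ '\n' := fun h => hl (h ▸ List.mem_cons_self)
      simp [skipUpTo, hc, ih n (fun h => hl (List.mem_cons_of_mem _ h))]

-- unfolding equations for scanB (its recursion is well-founded, so state them once)
theorem scanB_nil (n? : Option Nat) (bol : Bool) : scanB n? bol [] = [] := by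
  rw [scanB.eq_def]

theorem scanB_cons_space_none (rest : List Char) :
    scanB none true (' ' :: rest)
      = ' ' :: ' ' :: ' ' :: ' ' :: scanB (some (countSpaces (' ' :: rest))) false
          (skipUpTo (countSpaces (' ' :: rest)) (' ' :: rest)) := by
  rw [scanB.eq_def]
  simp

theorem scanB_cons_space_some (n : Nat) (rest : List Char) :
    scanB (some n) true (' ' :: rest)
      = ' ' :: ' ' :: ' ' :: ' ' :: scanB (some n) false (skipUpTo n (' ' :: rest)) := by
  rw [scanB.eq_def]
  simp

theorem scanB_cons_copy (n? : Option Nat) (bol : Bool) (c : Char) (rest : List Char)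
    (h : ¬ (bol = true ∧ c = ' ')) :
    scanB n? bol (c :: rest) = c :: scanB n? (decide (c = '\n')) rest := by
  rw [scanB.eq_def]
  simp [h]

-- countSpaces only looks at the leading space run: a [] or '\n'-headed tail never contributes
theorem countSpaces_stop (l t : List Char) (ht : t = [] ∨ ∃ u, t = '\n' :: u) :
    countSpaces (l ++ t) = countSpaces l := by
  induction l with
  | nil =>
    rcases ht with rfl | ⟨u, rfl⟩
    · rfl
    · simp [countSpaces]
  | cons c cs ih => simp [countSpaces, ih]

-- copying a newline-free block of characters with bol = false
theorem scan_copy (l : List Char) (hl : '\n' ∉ l) (n? : Option Nat) (t : List Char) :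
    scanB n? false (l ++ t) = l ++ scanB n? false t := by
  induction l with
  | nil => simp
  | cons c cs ih =>
    have hc : c ≠ '\n' := fun h => hl (h ▸ List.mem_cons_self)
    rw [List.cons_append, scanB_cons_copy n? false c (cs ++ t) (by simp)]
    simp [hc, ih (fun h => hl (List.mem_cons_of_mem _ h))]

theorem scan_nl (n? : Option Nat) (b : Bool) (u : List Char) :
    scanB n? b ('\n' :: u) = '\n' :: scanB n? true u := by
  rw [scanB_cons_copy n? b '\n' u (by simp)]
  simp

-- the per-line output and the n-state after a line (proof helpers, mirror A's branches)
def lineOut (n? : Option Nat) (l : List Char) : List Char :=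
  if PySem.Chars.startswith l [' '] then
    PySem.List.pyRepeat [' '] 4 ++ l.drop (n?.getD (countSpaces l))
  else l

def nextN (n? : Option Nat) (l : List Char) : Option Nat :=
  if PySem.Chars.startswith l [' '] then some (n?.getD (countSpaces l)) else n?

theorem startswith_space_pos (r : List Char) :
    PySem.Chars.startswith (' ' :: r) [' '] = true := by
  simp [PySem.Chars.startswith_iff, List.cons_prefix_cons]

theorem startswith_space_neg (c : Char) (r : List Char) (hc : c ≠ ' ') :
    PySem.Chars.startswith (c :: r) [' '] = false := by
  rw [Bool.eq_false_iff]
  intro h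
  have h' := (PySem.Chars.startswith_iff _ _).mp h
  rw [List.cons_prefix_cons] at h'
  exact hc h'.1.symm

theorem scan_line (l : List Char) (hl : '\n' ∉ l) (n? : Option Nat) (t : List Char)
    (ht : t = [] ∨ ∃ u, t = '\n' :: u) :
    scanB n? true (l ++ t) = lineOut n? l ++ scanB (nextN n? l) false t := by
  cases l with
  | nil =>
    have hsw : PySem.Chars.startswith ([] : List Char) [' '] = false := by decide
    rcases ht with rfl | ⟨u, rfl⟩
    · simp [lineOut, nextN, hsw, scanB_nil]
    · simp only [List.nil_append]
      rw [scan_nl, scan_nl]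
      simp [lineOut, nextN, hsw]
  | cons c r =>
    by_cases hc : c = ' '
    · subst hc
      have hnl : ∀ m : Nat, '\n' ∉ (' ' :: r).drop m :=
        fun m h => hl (List.drop_subset _ _ h)
      have hskip : ∀ m : Nat, skipUpTo m (' ' :: (r ++ t)) = (' ' :: r).drop m ++ t := by
        intro m
        rcases ht with rfl | ⟨u, rfl⟩
        · simpa using skip_noNl m (' ' :: r) hl
        · have := skip_noNl_append m (' ' :: r) u hl
          simpa using this
      have hcount : countSpaces (' ' :: (r ++ t)) = countSpaces (' ' :: r) := by
        have := countSpaces_stop (' ' :: r) t ht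
        simpa using this
      cases n? with
      | none =>
        rw [List.cons_append, scanB_cons_space_none, hcount, hskip,
          scan_copy _ (hnl (countSpaces (' ' :: r)))]
        simp [lineOut, nextN, startswith_space_pos]
      | some n =>
        rw [List.cons_append, scanB_cons_space_some, hskip, scan_copy _ (hnl n)]
        simp [lineOut, nextN, startswith_space_pos]
    · have hcnl : c ≠ '\n' := fun h => hl (h ▸ List.mem_cons_self)
      have hrl : '\n' ∉ r := fun h => hl (List.mem_cons_of_mem _ h)
      rw [List.cons_append, scanB_cons_copy n? true c (r ++ t) (by simp [hc]),
        show (decide (c = '\n')) = false by simp [hcnl], scan_copy r hrl n? t]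
      simp [lineOut, nextN, startswith_space_neg c r hc]

-- A's loop body, one step, phrased with lineOut/nextN
theorem fixIndentLoop_step (n? : Option Nat) (l : List Char) (ls : List (List Char)) :
    fixIndentLoop n? (l :: ls) = lineOut n? l :: fixIndentLoop (nextN n? l) ls := by
  by_cases hs : PySem.Chars.startswith l [' '] = false
  · simp [fixIndentLoop, hs, lineOut, nextN]
  · simp only [Bool.not_eq_false] at hs
    cases n? with
    | none => simp [fixIndentLoop, hs, lineOut, nextN, countSpaces_eq]
    | some n => simp [fixIndentLoop, hs, lineOut, nextN]

-- main correspondence: the char scanner over the joined lines = A's per-line loop, joined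
theorem scan_main (lines : List (List Char)) (hnl : ∀ l ∈ lines, '\n' ∉ l) (n? : Option Nat) :
    scanB n? true (PySem.Chars.join ['\n'] lines) =
      PySem.Chars.join ['\n'] (fixIndentLoop n? lines) := by
  induction lines generalizing n? with
  | nil => simp [PySem.Chars.join, List.intercalate, fixIndentLoop, scanB_nil]
  | cons l ls ih =>
    have hl : '\n' ∉ l := hnl l (by simp)
    cases ls with
    | nil =>
      rw [fixIndentLoop_step]
      simp only [fixIndentLoop]
      have h1 : PySem.Chars.join ['\n'] [l] = l ++ ([] : List Char) := by
        simp [PySem.Chars.join, List.intercalate]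
      have h2 : PySem.Chars.join ['\n'] [lineOut n? l] = lineOut n? l := by
        simp [PySem.Chars.join, List.intercalate]
      rw [h1, h2, scan_line l hl n? [] (Or.inl rfl)]
      simp [scanB_nil]
    | cons l2 ls' =>
      have hjoin : PySem.Chars.join ['\n'] (l :: l2 :: ls')
          = l ++ '\n' :: PySem.Chars.join ['\n'] (l2 :: ls') := by
        simp [PySem.Chars.join, List.intercalate]
      rw [hjoin, fixIndentLoop_step n? l, scan_line l hl n? _ (Or.inr ⟨_, rfl⟩), scan_nl,
        ih (fun x hx => hnl x (List.mem_cons_of_mem _ hx)) (nextN n? l)]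
      cases h : fixIndentLoop (nextN n? l) (l2 :: ls') with
      | nil => cases ls' <;> simp [fixIndentLoop_step] at h
      | cons q qs => simp [PySem.Chars.join, List.intercalate]

-- ===== VERDICT (by name: the statement is the Claim_ definition above) =====
theorem fix_indent_py_spec : Claim_equal_fix_indent_py := by
  intro source _
  show fix_indent_py source = fix_indent_py_alt source
  unfold fix_indent_py fix_indent_py_alt
  rw [splitOn_eq_sp]
  rw [show source.toList = PySem.Chars.join ['\n'] (sp source.toList) from (join_sp _).symm]
  rw [scan_main (sp source.toList) (no_nl_sp _) none]
  rw [join_sp]
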